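-- pv_equiv track=rewrite | github.com/Nosolution/Flare | auxiliary/helper.py | get_class_indices
-- ===== SOURCE A (Python) =====
-- from collections import Counter
--
-- def count_class_num(data_set: list) -> int:
--     """
--     计算数据集的总类别数目
--     :param data_set: 数据集, 要求格式[[x_1, x_2, x_3,..., x_n, label],..., [x_1, x_2, x_3,..., x_n, label]]
--     """
--     return len(Counter(list(map(lambda x: x[-1], data_set))))
--
-- def get_class_indices(data_set: list) -> list:
--     """
--     对数据集进行排序，查找各类第一个数据的下标并返回包含其数值的列表
--     :param data_set: 数据集, 要求格式[[x_1, x_2, x_3,..., x_n, label],..., [x_1, x_2, x_3,..., x_n, label]], 其中label为整数且大于0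
--     :return: 包含各类第一个数据的下标的列表
--     """
--     # sort(data_set, key=(lambda x: x[-1]))  # 此处会对原列表进行排序
--     data_set.sort(key=lambda x: x[-1])
--     class_num = count_class_num(data_set)
--     indices = [0]  # 第一个下标必为0
--     for i in range(1, class_num):
--         for j in range(indices[i - 1] + 1, len(data_set)):
--             if data_set[j][-1] != data_set[indices[i - 1]][-1]:
--                 indices.append(j)
--                 break
--     indices.append(len(data_set))
--     return indices
-- ===== SOURCE B (Python) =====
-- def get_class_indices(data_set: list) -> list:
--     data_set.sort(key=lambda x: x[-1])
--     indices = [0]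
--     for i in range(1, len(data_set)):
--         if data_set[i][-1] != data_set[i - 1][-1]:
--             indices.append(i)
--     indices.append(len(data_set))
--     return indices
-- ===== Notes on version B (the rewrite author's own statement) =====
-- stated objective: simpler
-- what changed: Replaces the Counter-based class count and the nested boundary-search loops with a single adjacent-difference scan over the sorted data.
import Mathlib
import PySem

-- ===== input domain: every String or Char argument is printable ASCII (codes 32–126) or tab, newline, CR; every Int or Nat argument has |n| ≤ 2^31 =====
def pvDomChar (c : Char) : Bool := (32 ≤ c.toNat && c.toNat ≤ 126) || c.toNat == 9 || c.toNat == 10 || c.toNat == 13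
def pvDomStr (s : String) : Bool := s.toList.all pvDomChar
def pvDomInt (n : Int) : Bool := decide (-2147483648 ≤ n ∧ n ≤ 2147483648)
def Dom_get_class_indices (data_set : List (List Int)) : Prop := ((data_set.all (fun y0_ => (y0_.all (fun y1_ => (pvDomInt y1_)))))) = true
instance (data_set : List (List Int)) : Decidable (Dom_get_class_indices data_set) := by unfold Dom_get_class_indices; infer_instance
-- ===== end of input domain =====

-- B replaces A's Counter-based class count and nested boundary-search loops by one
-- adjacent-difference scan over the sorted data (simpler). Both A and B sort data_set
-- in place (same mutation); the equivalence proved here is about the return value.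

-- ===== PORT A =====
-- x[-1] is ported as pyGetD x (-1) 0: exact on the nonempty rows Pre_ admits (Python raises IndexError on an empty row).
-- indices[i-1] is ported as pyGetD indices (i-1) 0: the index is always in range when the loop runs.
def get_class_indices (data_set : List (List Int)) : List Int :=
  let s := PySem.List.sorted data_set (fun x => PySem.List.pyGetD x (-1) 0) false
  -- count_class_num: len(Counter(list(map(lambda x: x[-1], data_set))))
  let class_num : Int := ((PySem.Dict.counter (s.map (fun x => PySem.List.pyGetD x (-1) 0))).size : Int)
  let indices : List Int :=
    (PySem.List.pyRange 1 class_num 1).foldl (fun ind i =>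
      let prev := PySem.List.pyGetD ind (i - 1) 0
      -- inner 'for j in range(indices[i-1]+1, len(data_set)): if …: append; break' = first j with a different label
      match (PySem.List.pyRange (prev + 1) (s.length : Int) 1).find? (fun j =>
          decide (PySem.List.pyGetD (PySem.List.pyGetD s j []) (-1) 0 ≠
                  PySem.List.pyGetD (PySem.List.pyGetD s prev []) (-1) 0)) with
      | some j => ind ++ [j]
      | none => ind) [0]
  indices ++ [(s.length : Int)]

-- ===== PORT B =====
def get_class_indices_alt (data_set : List (List Int)) : List Int :=
  let s := PySem.List.sorted data_set (fun x => PySem.List.pyGetD x (-1) 0) false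
  let indices : List Int :=
    (PySem.List.pyRange 1 (s.length : Int) 1).foldl (fun ind i =>
      if decide (PySem.List.pyGetD (PySem.List.pyGetD s i []) (-1) 0 ≠
                 PySem.List.pyGetD (PySem.List.pyGetD s (i - 1) []) (-1) 0)
      then ind ++ [i] else ind) [0]
  indices ++ [(s.length : Int)]

-- ===== PRECONDITION & SPEC =====
-- Pre_ excludes data sets containing an empty row: there the Python A raises IndexError on x[-1].
def Pre_get_class_indices (data_set : List (List Int)) : Prop := ∀ row ∈ data_set, row ≠ []
instance (data_set : List (List Int)) : Decidable (Pre_get_class_indices data_set) := by unfold Pre_get_class_indices; infer_instance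
def pvWitness_get_class_indices : List (List Int) := [[1, 2], [3, 1], [4, 2], [5, 1]]

def Spec_get_class_indices (data_set : List (List Int)) (out : List Int) : Prop := out = get_class_indices_alt data_set
instance (data_set : List (List Int)) (out : List Int) : Decidable (Spec_get_class_indices data_set out) := by unfold Spec_get_class_indices; infer_instance

-- ===== CLAIM (what is proved, stated in full; the proofs are below) =====
def Claim_equal_get_class_indices : Prop := ∀ (data_set : List (List Int)), Dom_get_class_indices data_set → Pre_get_class_indices data_set → Spec_get_class_indices data_set (get_class_indices data_set)

-- ===== LEMMAS AND PROOFS =====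

-- the sort key, the label of row j of s, the label list, its adjacent-change positions,
-- and one step of A's outer loop
def pvKey (x : List Int) : Int := PySem.List.pyGetD x (-1) 0
def pvF (s : List (List Int)) (j : Int) : Int := PySem.List.pyGetD (PySem.List.pyGetD s j []) (-1) 0
def pvG (L : List Int) (j : Int) : Int := L.getD j.toNat 0
def pvC (L : List Int) : List Int :=
  (PySem.List.pyRange 1 (L.length : Int) 1).filter (fun i => decide (pvG L i ≠ pvG L (i - 1)))
def pvStep (s : List (List Int)) (ind : List Int) (i : Int) : List Int :=
  let prev := PySem.List.pyGetD ind (i - 1) 0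
  match (PySem.List.pyRange (prev + 1) (s.length : Int) 1).find? (fun j =>
      decide (PySem.List.pyGetD (PySem.List.pyGetD s j []) (-1) 0 ≠
              PySem.List.pyGetD (PySem.List.pyGetD s prev []) (-1) 0)) with
  | some j => ind ++ [j]
  | none => ind

theorem pvF_eq_pvG (s : List (List Int)) (j : Int) (h0 : 0 ≤ j) :
    pvF s j = pvG (s.map pvKey) j := by
  unfold pvF pvG pvKey
  by_cases h : j < (s.length : Int)
  · rw [PySem.List.pyGetD_eq_getElem s [] h0 h]
    have hj : j.toNat < s.length := by omega
    rw [List.getD_eq_getElem _ _ (by simpa using hj)]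
    simp
  · have h1 : PySem.List.pyGetD s j [] = [] := by
      apply PySem.List.pyGetD_of_none
      rw [PySem.List.pyGet?_eq_none_iff]
      simp [PySem.Raise.InRange]; omega
    rw [h1]
    have h2 : (List.map (fun x => PySem.List.pyGetD x (-1) 0) s).getD j.toNat 0 = 0 := by
      apply List.getD_eq_default; simp; omega
    rw [h2]; decide

theorem mem_pvC (L : List Int) (x : Int) :
    x ∈ pvC L ↔ 1 ≤ x ∧ x < (L.length : Int) ∧ pvG L x ≠ pvG L (x - 1) := by
  unfold pvC
  simp [List.mem_filter, PySem.List.mem_pyRange_one]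
  tauto

theorem pvC_pairwise (L : List Int) : (pvC L).Pairwise (· < ·) := by
  exact List.Pairwise.filter _ (PySem.List.pairwise_lt_pyRange_one 1 (L.length : Int))

-- find? over a range finds the stated first hit
theorem find_first (p : Int → Bool) (a c n : Int) (hac : a ≤ c) (hcn : c < n)
    (hpc : p c = true) (hbef : ∀ j, a ≤ j → j < c → p j = false) :
    (PySem.List.pyRange a n 1).find? p = some c := by
  rw [PySem.List.pyRange_one_append a c n hac (le_of_lt hcn), List.find?_append]
  have h1 : (PySem.List.pyRange a c 1).find? p = none := by
    rw [List.find?_eq_none]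
    intro j hj
    rw [PySem.List.mem_pyRange_one] at hj
    simp [hbef j hj.1 hj.2]
  rw [h1, PySem.List.pyRange_one_cons hcn]
  simp [List.find?, hpc]

-- labels are constant on a changepoint-free stretch
theorem const_run (L : List Int) (b c : Int) (hb : 0 ≤ b) (hc : c ≤ (L.length : Int))
    (hno : ∀ j, b < j → j < c → j ∉ pvC L) :
    ∀ j, b ≤ j → j < c → pvG L j = pvG L b := by
  have key : ∀ k : Nat, ∀ j, j = b + (k : Int) → j < c → pvG L j = pvG L b := by
    intro k
    induction k with
    | zero => intro j hj _; simp at hj; rw [hj]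
    | succ k ih =>
      intro j hj hjc
      have hbj : b < j := by omega
      have hmem : j ∉ pvC L := hno j hbj hjc
      rw [mem_pvC] at hmem
      push Not at hmem
      have hstep : pvG L j = pvG L (j - 1) := by
        by_contra hne
        exact hne (hmem (by omega) (by omega))
      rw [hstep, ih (j - 1) (by omega) (by omega)]
  intro j hbj hjc
  exact key (j - b).toNat j (by omega) hjc

-- sorted labels: number of distinct labels = number of adjacent changes + 1
theorem count_distinct (L : List Int) : L.Pairwise (· ≤ ·) → L ≠ [] →
    (PySem.Set.ofList L).length = (pvC L).length + 1 := by
  induction L using List.reverseRecOn with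
  | nil => intro _ h; exact absurd rfl h
  | append_singleton M x ih =>
    intro hL _
    rcases List.pairwise_append.mp hL with ⟨hM, -, hMx⟩
    by_cases hMnil : M = []
    · subst hMnil
      simp [pvC, PySem.Set.ofList, PySem.Set.add, PySem.List.pyRange_one_eq_nil]
    · have hl : 1 ≤ M.length := List.length_pos_iff.mpr hMnil
      have hlast : M.length - 1 < M.length := by omega
      -- pvG values at and before the appended position
      have hx_at : pvG (M ++ [x]) (M.length : Int) = x := by
        unfold pvG
        rw [show ((M.length : Int)).toNat = M.length by omega]
        rw [List.getD_eq_getElem _ _ (by simp)]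
        simp
      have hx_prev : pvG (M ++ [x]) ((M.length : Int) - 1) = M[M.length - 1] := by
        unfold pvG
        rw [show ((M.length : Int) - 1).toNat = M.length - 1 by omega]
        rw [List.getD_eq_getElem _ _ (by simp only [List.length_append, List.length_singleton]; omega)]
        rw [List.getElem_append_left (by omega)]
      -- the changepoints of M ++ [x]
      have hsplit : pvC (M ++ [x]) = pvC M ++ if x = M[M.length - 1] then [] else [(M.length : Int)] := by
        unfold pvC
        rw [show ((M ++ [x]).length : Int) = (M.length : Int) + 1 by simp]
        rw [PySem.List.pyRange_one_succ_right (by omega), List.filter_append]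
        congr 1
        · apply List.filter_congr
          intro i hi
          rw [PySem.List.mem_pyRange_one] at hi
          have h1 : pvG (M ++ [x]) i = pvG M i := by
            unfold pvG
            rw [List.getD_append _ _ _ _ (by omega)]
          have h2 : pvG (M ++ [x]) (i - 1) = pvG M (i - 1) := by
            unfold pvG
            rw [List.getD_append _ _ _ _ (by omega)]
          rw [h1, h2]
        · simp only [List.filter, hx_at, hx_prev]
          by_cases hxe : x = M[M.length - 1] <;> simp [hxe]
      -- membership of x in M is equality with the last element
      have hmem_iff : x ∈ M ↔ x = M[M.length - 1] := by
        constructor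
        · intro hxm
          obtain ⟨k, hk, hke⟩ := List.getElem_of_mem hxm
          have hmono := List.pairwise_iff_getElem.mp hM
          have h1 : M[k] ≤ M[M.length - 1] := by
            rcases Nat.lt_or_ge k (M.length - 1) with h | h
            · exact hmono k (M.length - 1) hk hlast h
            · have : k = M.length - 1 := by omega
              subst this; exact le_refl _
          have h2 : M[M.length - 1] ≤ x := hMx M[M.length - 1] (List.getElem_mem hlast) x (by simp)
          omega
        · intro h; rw [h]; exact List.getElem_mem hlast
      rw [PySem.Set.ofList_append_singleton, PySem.Set.add_eq_ite, hsplit]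
      by_cases hxe : x = M[M.length - 1]
      · have hxm : x ∈ PySem.Set.ofList M := by rw [PySem.Set.mem_ofList]; exact hmem_iff.mpr hxe
        simp [hxe, ih hM hMnil]
      · have hxm : x ∉ PySem.Set.ofList M := by
          rw [PySem.Set.mem_ofList]; exact fun h => hxe (hmem_iff.mp h)
        simp [hxm, hxe, ih hM hMnil]

-- len(Counter(xs)) counts the distinct elements
theorem counter_size (L : List Int) : (PySem.Dict.counter L).size = (PySem.Set.ofList L).length := by
  rw [← PySem.Dict.keys_counter]
  simp [PySem.Dict.size, PySem.Dict.keys]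

-- one step of A's outer loop, from the invariant state
theorem pvStep_eq (s : List (List Int)) (m : Nat) (hm : m < (pvC (s.map pvKey)).length) :
    pvStep s (0 :: (pvC (s.map pvKey)).take m) (1 + (m : Int)) =
      0 :: (pvC (s.map pvKey)).take (m + 1) := by
  set L := s.map pvKey with hLdef
  set C := pvC L with hCdef
  have hlen : (L.length : Int) = (s.length : Int) := by simp [hLdef]
  have hcm := (mem_pvC L C[m]).mp (List.getElem_mem hm)
  have hmono := List.pairwise_iff_getElem.mp (pvC_pairwise L)
  -- the previous boundary
  have hprev : PySem.List.pyGetD (0 :: C.take m) ((1 + (m : Int)) - 1) 0 =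
      (0 :: C.take m).getD m 0 := by
    rw [show (1 + (m : Int)) - 1 = ((m : Nat) : Int) by omega, PySem.List.pyGetD_natCast]
  set bm := (0 :: C.take m).getD m 0 with hbmdef
  have hbm_facts : 0 ≤ bm ∧ bm < C[m] ∧ ∀ j, bm < j → j < C[m] → j ∉ C := by
    by_cases hm0 : m = 0
    · subst hm0
      have hbm : bm = 0 := by simp [hbmdef]
      refine ⟨by omega, by rw [hbm]; omega, ?_⟩
      intro j h1 h2 hj
      obtain ⟨k, hk, hke⟩ := List.getElem_of_mem hj
      have : C[0] ≤ C[k] := by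
        rcases Nat.eq_zero_or_pos k with h | h
        · subst h; exact le_refl _
        · exact le_of_lt (hmono 0 k (by omega) hk h)
      omega
    · obtain ⟨k, rfl⟩ : ∃ k, m = k + 1 := ⟨m - 1, by omega⟩
      have hm1 : k < C.length := by omega
      have hbm : bm = C[k] := by
        rw [hbmdef, List.getD_cons_succ]
        rw [List.getD_eq_getElem _ _ (by rw [List.length_take]; omega)]
        rw [List.getElem_take]
      have hlt : C[k] < C[k + 1] := hmono k (k + 1) hm1 hm (by omega)
      refine ⟨?_, by omega, ?_⟩
      · have := (mem_pvC L C[k]).mp (List.getElem_mem hm1)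
        omega
      · intro j h1 h2 hj
        obtain ⟨k', hk', hke⟩ := List.getElem_of_mem hj
        rw [hbm] at h1
        have hkm : k + 1 ≤ k' := by
          by_contra hklt
          have : C[k'] ≤ C[k] := by
            rcases Nat.lt_or_ge k' k with h | h
            · exact le_of_lt (hmono k' k hk' hm1 h)
            · have : k' = k := by omega
              subst this; exact le_refl _
          omega
        have : C[k + 1] ≤ C[k'] := by
          rcases Nat.eq_or_lt_of_le hkm with h | h
          · subst h; exact le_refl _
          · exact le_of_lt (hmono (k + 1) k' hm hk' h)
        omega
  obtain ⟨hbm0, hbmlt, hbetween⟩ := hbm_facts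
  have hconst := const_run L bm C[m] hbm0 (by omega) hbetween
  have hfind : (PySem.List.pyRange (bm + 1) (s.length : Int) 1).find? (fun j =>
      decide (PySem.List.pyGetD (PySem.List.pyGetD s j []) (-1) 0 ≠
              PySem.List.pyGetD (PySem.List.pyGetD s bm []) (-1) 0)) = some C[m] := by
    apply find_first _ _ _ _ (by omega) (by omega)
    · have h1 : pvF s C[m] = pvG L C[m] := pvF_eq_pvG s _ (by omega)
      have h2 : pvF s bm = pvG L bm := pvF_eq_pvG s _ hbm0
      have h3 : pvG L (C[m] - 1) = pvG L bm := hconst _ (by omega) (by omega)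
      have : pvF s C[m] ≠ pvF s bm := by
        rw [h1, h2, ← h3]; exact hcm.2.2
      simpa [pvF] using this
    · intro j hj1 hj2
      have h1 : pvF s j = pvG L j := pvF_eq_pvG s _ (by omega)
      have h2 : pvF s bm = pvG L bm := pvF_eq_pvG s _ hbm0
      have h3 : pvG L j = pvG L bm := hconst _ (by omega) (by omega)
      have : pvF s j = pvF s bm := by rw [h1, h2, h3]
      simpa [pvF] using this
  show pvStep s (0 :: C.take m) (1 + (m : Int)) = 0 :: C.take (m + 1)
  unfold pvStep
  simp only [hprev]
  rw [hfind]
  rw [List.take_add_one]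
  simp [List.getElem?_eq_getElem hm]

-- A's outer loop builds 0 :: (the first m changepoints)
theorem A_loop (s : List (List Int)) :
    ∀ m : Nat, m ≤ (pvC (s.map pvKey)).length →
    (PySem.List.pyRange 1 (1 + (m : Int)) 1).foldl (pvStep s) [0] =
      0 :: (pvC (s.map pvKey)).take m := by
  intro m
  induction m with
  | zero =>
    intro _
    rw [show (1 : Int) + ((0 : Nat) : Int) = 1 by norm_num]
    rw [PySem.List.pyRange_one_eq_nil (by omega)]
    simp
  | succ m ih =>
    intro hm
    rw [show (1 : Int) + ((m + 1 : Nat) : Int) = (1 + (m : Int)) + 1 by push_cast; ring]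
    rw [PySem.List.pyRange_one_succ_right (by omega), List.foldl_append, ih (by omega)]
    simp only [List.foldl_cons, List.foldl_nil]
    exact pvStep_eq s m (by omega)

theorem main_eq (ds : List (List Int)) : get_class_indices ds = get_class_indices_alt ds := by
  have hA : get_class_indices ds =
      (PySem.List.pyRange 1
          ((PySem.Dict.counter ((PySem.List.sorted ds pvKey false).map pvKey)).size : Int) 1).foldl
        (pvStep (PySem.List.sorted ds pvKey false)) [0]
        ++ [((PySem.List.sorted ds pvKey false).length : Int)] := rfl
  have hB : get_class_indices_alt ds =
      ((PySem.List.pyRange 1 ((PySem.List.sorted ds pvKey false).length : Int) 1).foldl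
        (fun ind i => if decide (pvF (PySem.List.sorted ds pvKey false) i ≠
            pvF (PySem.List.sorted ds pvKey false) (i - 1)) then ind ++ [i] else ind) [0])
        ++ [((PySem.List.sorted ds pvKey false).length : Int)] := rfl
  rw [hA, hB]
  set s := PySem.List.sorted ds pvKey false with hs
  set L := s.map pvKey with hL
  rw [PySem.List.foldl_append_if (fun i => decide (pvF s i ≠ pvF s (i - 1))) (fun i => i)]
  have hBfilter : (PySem.List.pyRange 1 (s.length : Int) 1).filter
      (fun i => decide (pvF s i ≠ pvF s (i - 1))) = pvC L := by
    unfold pvC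
    rw [show ((L.length : Int)) = (s.length : Int) by simp [hL]]
    apply List.filter_congr
    intro i hi
    rw [PySem.List.mem_pyRange_one] at hi
    rw [pvF_eq_pvG s i (by omega), pvF_eq_pvG s (i - 1) (by omega)]
  rw [hBfilter]; simp only [List.map_id']
  by_cases hs0 : s = []
  · have hL0 : L = [] := by simp [hL, hs0]
    rw [hL0, counter_size]
    show List.foldl (pvStep s) [0] (PySem.List.pyRange 1 ((0 : Nat) : Int)) ++ [(s.length : Int)] =
      [0] ++ pvC [] ++ [(s.length : Int)]
    rw [PySem.List.pyRange_one_eq_nil (by norm_num)]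
    simp [pvC, PySem.List.pyRange_one_eq_nil]
  · have hLne : L ≠ [] := by simp [hL, hs0]
    have hpw : L.Pairwise (· ≤ ·) := PySem.List.sorted_map_key_pairwise ds pvKey
    have hcn : ((PySem.Dict.counter L).size : Int) = 1 + ((pvC L).length : Int) := by
      rw [counter_size, count_distinct L hpw hLne]
      push_cast; ring
    rw [hcn, A_loop s (pvC L).length (le_refl _), List.take_length]
    simp

-- ===== VERDICT (by name: the statement is the Claim_ definition above) =====
theorem get_class_indices_spec : Claim_equal_get_class_indices := by
  intro data_set _hdom _hpre
  unfold Spec_get_class_indices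
  exact main_eq data_set
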